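-- pv_equiv track=rewrite | github.com/Emerentius/ProjectEuler | 090_cube_digit_pairs/090.py | are_valid_sets
-- ===== SOURCE A (Python) =====
-- def are_valid_sets(set1, set2):
--     def clauses(set1, set2):
--         yield 0 in set1 and 1 in set2
--         yield 0 in set1 and 4 in set2
--         yield 0 in set1 and (9 in set2 or 6 in set2)
--         yield 1 in set1 and (6 in set2 or 9 in set2)
--         yield 2 in set1 and 5 in set2
--         yield 3 in set1 and (6 in set2 or 9 in set2)
--         yield 4 in set1 and (6 in set2 or 9 in set2)
--         yield (6 in set1 or 9 in set1) and 4 in set2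
--         yield 8 in set1 and 1 in set2
--
--     checks1 = clauses(set1, set2)
--     checks2 = clauses(set2, set1)
--
--     return all(c1 | c2 for c1, c2 in zip(checks1, checks2))
-- ===== SOURCE B (Python) =====
-- REQUIRED = [(0, 1), (0, 4), (0, 9), (1, 6), (2, 5), (3, 6), (4, 9), (6, 4), (8, 1)]
--
--
-- def _variants(d):
--     return (6, 9) if d in (6, 9) else (d,)
--
--
-- def are_valid_sets(set1, set2):
--     # Generate every displayable digit pair from the two sets, then check the
--     # nine required square pairs against that generated set.
--     formable = set()
--     for x in set1:
--         for y in set2: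
--             for a in _variants(x):
--                 for b in _variants(y):
--                     formable.add((a, b))
--                     formable.add((b, a))
--     return all(p in formable for p in REQUIRED)
-- ===== Notes on version B (the rewrite author's own statement) =====
-- stated objective: alternative
-- what changed: Instead of A's nine hardcoded requirement clauses evaluated in both directions and zipped, B generates the set of all displayable digit pairs from the two sets (nested loops over the elements, expanding 6/9 variants and both orientations) and then tests the nine required square pairs against that generated set.
import Mathlib
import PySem

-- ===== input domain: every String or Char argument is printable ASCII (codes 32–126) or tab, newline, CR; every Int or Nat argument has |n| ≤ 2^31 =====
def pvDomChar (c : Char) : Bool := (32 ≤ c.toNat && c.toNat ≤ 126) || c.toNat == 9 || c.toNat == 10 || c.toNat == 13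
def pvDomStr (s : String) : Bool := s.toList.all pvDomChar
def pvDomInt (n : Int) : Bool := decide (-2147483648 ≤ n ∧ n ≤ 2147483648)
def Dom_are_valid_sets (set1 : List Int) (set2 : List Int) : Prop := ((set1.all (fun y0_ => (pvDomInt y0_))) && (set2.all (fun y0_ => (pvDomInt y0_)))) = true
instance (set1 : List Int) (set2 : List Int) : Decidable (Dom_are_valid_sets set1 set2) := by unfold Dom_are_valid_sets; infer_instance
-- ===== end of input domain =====

-- B replaces A's nine hardcoded requirement clauses (run in both directions and zipped)
-- by a generate-and-test pass: it enumerates every displayable digit pair over the two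
-- sets (with 6/9 variants) into one set and checks the nine square pairs against it;
-- objective: alternative algorithm.

-- ===== PORT A =====
-- the inner generator 'clauses(set1, set2)' of A, as the list of its nine yielded booleans
def avsClauses (set1 : List Int) (set2 : List Int) : List Bool :=
  [ set1.contains 0 && set2.contains 1,
    set1.contains 0 && set2.contains 4,
    set1.contains 0 && (set2.contains 9 || set2.contains 6),
    set1.contains 1 && (set2.contains 6 || set2.contains 9),
    set1.contains 2 && set2.contains 5,
    set1.contains 3 && (set2.contains 6 || set2.contains 9),
    set1.contains 4 && (set2.contains 6 || set2.contains 9),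
    (set1.contains 6 || set1.contains 9) && set2.contains 4,
    set1.contains 8 && set2.contains 1 ]

def are_valid_sets (set1 : List Int) (set2 : List Int) : Bool :=
  ((avsClauses set1 set2).zip (avsClauses set2 set1)).all (fun p => p.1 || p.2)

-- ===== PORT B =====
def avsRequired : List (Int × Int) :=
  [(0, 1), (0, 4), (0, 9), (1, 6), (2, 5), (3, 6), (4, 9), (6, 4), (8, 1)]

def avsVariants (d : Int) : List Int := if d = 6 ∨ d = 9 then [6, 9] else [d]

-- the body of the two inner 'for a/for b' loops for one element pair (x, y)
def avsAddPairs (acc : PySem.Set (Int × Int)) (x y : Int) : PySem.Set (Int × Int) :=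
  (avsVariants x).foldl (fun acc a =>
    (avsVariants y).foldl (fun acc b =>
      PySem.Set.add (PySem.Set.add acc (a, b)) (b, a)) acc) acc

def avsFormable (set1 : List Int) (set2 : List Int) : PySem.Set (Int × Int) :=
  set1.foldl (fun acc x => set2.foldl (fun acc y => avsAddPairs acc x y) acc) PySem.Set.empty

def are_valid_sets_alt (set1 : List Int) (set2 : List Int) : Bool :=
  avsRequired.all (fun p => PySem.Set.contains (avsFormable set1 set2) p)

-- ===== PRECONDITION & SPEC =====
def Spec_are_valid_sets (set1 : List Int) (set2 : List Int) (out : Bool) : Prop := out = are_valid_sets_alt set1 set2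
instance (set1 : List Int) (set2 : List Int) (out : Bool) : Decidable (Spec_are_valid_sets set1 set2 out) := by unfold Spec_are_valid_sets; infer_instance

-- ===== CLAIM (what is proved, stated in full; the proofs are below) =====
def Claim_equal_are_valid_sets : Prop := ∀ (set1 : List Int) (set2 : List Int), Dom_are_valid_sets set1 set2 → Spec_are_valid_sets set1 set2 (are_valid_sets set1 set2)

-- ===== LEMMAS AND PROOFS =====

theorem mem_foldl_add2 {beta gamma : Type} [BEq gamma] [LawfulBEq gamma] (f g : beta -> gamma)
    (l : List beta) (acc : PySem.Set gamma) (p : gamma) :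
    p ∈ l.foldl (fun acc b => PySem.Set.add (PySem.Set.add acc (f b)) (g b)) acc ↔
      p ∈ acc ∨ ∃ b ∈ l, p = f b ∨ p = g b := by
  induction l generalizing acc with
  | nil => simp
  | cons h t ih => rw [List.foldl_cons, ih]; simp [PySem.Set.mem_add, or_assoc]

theorem mem_foldl_step {β γ : Type} [BEq γ] [LawfulBEq γ] (f : PySem.Set γ → β → PySem.Set γ)
    (Q : β → γ → Prop) (hf : ∀ acc x p, p ∈ f acc x ↔ p ∈ acc ∨ Q x p)
    (l : List β) (acc : PySem.Set γ) (p : γ) :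
    p ∈ l.foldl f acc ↔ p ∈ acc ∨ ∃ x ∈ l, Q x p := by
  induction l generalizing acc with
  | nil => simp
  | cons h t ih => rw [List.foldl_cons, ih, hf]; simp [List.mem_cons, or_assoc,
      exists_eq_or_imp]

theorem mem_avsAddPairs (acc : PySem.Set (Int × Int)) (x y : Int) (p : Int × Int) :
    p ∈ avsAddPairs acc x y ↔
      p ∈ acc ∨ ∃ a ∈ avsVariants x, ∃ b ∈ avsVariants y, p = (a, b) ∨ p = (b, a) := by
  unfold avsAddPairs
  rw [mem_foldl_step _ (fun a p => ∃ b ∈ avsVariants y, p = (a, b) ∨ p = (b, a))]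
  intro acc a q
  exact mem_foldl_add2 (fun b => (a, b)) (fun b => (b, a)) _ acc q

theorem mem_avsFormable (set1 set2 : List Int) (p : Int × Int) :
    p ∈ avsFormable set1 set2 ↔
      ∃ x ∈ set1, ∃ y ∈ set2, ∃ a ∈ avsVariants x, ∃ b ∈ avsVariants y,
        p = (a, b) ∨ p = (b, a) := by
  unfold avsFormable
  rw [mem_foldl_step _ (fun x p => ∃ y ∈ set2, ∃ a ∈ avsVariants x, ∃ b ∈ avsVariants y,
        p = (a, b) ∨ p = (b, a))]
  · simp [PySem.Set.empty]
  · intro acc x q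
    exact mem_foldl_step _ (fun y q => ∃ a ∈ avsVariants x, ∃ b ∈ avsVariants y,
        q = (a, b) ∨ q = (b, a)) (fun acc y q => mem_avsAddPairs acc x y q) set2 acc q

theorem exists_variants (s : List Int) (a : Int) :
    (∃ x ∈ s, a ∈ avsVariants x) ↔ (if a = 6 ∨ a = 9 then 6 ∈ s ∨ 9 ∈ s else a ∈ s) := by
  have hmem : ∀ x, a ∈ avsVariants x ↔ (if a = 6 ∨ a = 9 then x = 6 ∨ x = 9 else x = a) := by
    intro x
    unfold avsVariants
    split_ifs with hx ha ha <;> simp_all <;> omega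
  simp only [hmem]
  split_ifs with ha
  · constructor
    · rintro ⟨x, hx, h6 | h9⟩ <;> subst_vars <;> tauto
    · rintro (h | h) <;> exact ⟨_, h, by tauto⟩
  · constructor
    · rintro ⟨x, hx, rfl⟩; exact hx
    · intro h; exact ⟨a, h, rfl⟩

-- containment of the required pair (u,v) in the formable set, as membership clauses
theorem formable_pair (set1 set2 : List Int) (u v : Int) :
    (u, v) ∈ avsFormable set1 set2 ↔
      ((∃ x ∈ set1, u ∈ avsVariants x) ∧ (∃ y ∈ set2, v ∈ avsVariants y)) ∨
      ((∃ x ∈ set1, v ∈ avsVariants x) ∧ (∃ y ∈ set2, u ∈ avsVariants y)) := by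
  rw [mem_avsFormable]
  constructor
  · rintro ⟨x, hx, y, hy, a, ha, b, hb, h | h⟩
    · rw [Prod.mk.injEq] at h
      obtain ⟨rfl, rfl⟩ := h
      exact Or.inl ⟨⟨x, hx, ha⟩, ⟨y, hy, hb⟩⟩
    · rw [Prod.mk.injEq] at h
      obtain ⟨rfl, rfl⟩ := h
      exact Or.inr ⟨⟨x, hx, ha⟩, ⟨y, hy, hb⟩⟩
  · rintro (⟨⟨x, hx, hax⟩, ⟨y, hy, hby⟩⟩ | ⟨⟨x, hx, hax⟩, ⟨y, hy, hby⟩⟩)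
    · exact ⟨x, hx, y, hy, u, hax, v, hby, Or.inl rfl⟩
    · exact ⟨x, hx, y, hy, v, hax, u, hby, Or.inr rfl⟩

theorem are_valid_sets_spec : Claim_equal_are_valid_sets := by
  intro set1 set2 _
  unfold Spec_are_valid_sets
  rw [Bool.eq_iff_iff]
  simp only [are_valid_sets, are_valid_sets_alt, avsClauses, avsRequired,
    List.zip_cons_cons, List.zip_nil_right, List.all_cons, List.all_nil, Bool.and_true,
    Bool.and_eq_true, Bool.or_eq_true, List.contains_eq_mem, decide_eq_true_eq,
    PySem.Set.contains_iff]
  simp only [formable_pair, exists_variants]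
  norm_num
  exact and_congr (by tauto) (and_congr (by tauto) (and_congr (by tauto)
    (and_congr (by tauto) (and_congr (by tauto) (and_congr (by tauto)
    (and_congr (by tauto) (and_congr (by tauto) (by tauto))))))))
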